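-- pv_equiv track=rewrite | github.com/RighteousW/sign_avatar | src/interpolation_transition.py | analyze_hand_presence
-- ===== SOURCE A (Python) =====
-- from typing import List, Dict, Any, Tuple, Optional
--
-- def analyze_hand_presence(frames: List[Dict]) -> Dict[str, List[int]]:
--     """Analyze which frames have which hands present"""
--     left_frames = []
--     right_frames = []
--
--     for i, frame in enumerate(frames):
--         if 'hands' in frame and frame['hands']:
--             for hand in frame['hands']:
--                 if hand['handedness'] == 'Left':
--                     left_frames.append(i)
--                 elif hand['handedness'] == 'Right':
--                     right_frames.append(i)
--
--     return {
--         'Left': sorted(list(set(left_frames))),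
--         'Right': sorted(list(set(right_frames)))
--     }
-- ===== SOURCE B (Python) =====
-- from typing import List, Dict
--
--
-- def analyze_hand_presence(frames: List[Dict]) -> Dict[str, List[int]]:
--     """Analyze which frames have which hands present.
--
--     Dict-driven: the two result lists live in the output dict itself and each
--     hand's handedness string is used directly as a lookup key (no if/elif
--     dispatch).  A frame index is appended only when the bucket's last element
--     differs from it; since indices increase, each bucket stays sorted and
--     duplicate-free by construction, so no sorted(set(...)) post-pass exists.
--     """
--     buckets = {'Left': [], 'Right': []}
--     for i, frame in enumerate(frames):
--         for hand in (frame.get('hands') or []):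
--             lst = buckets.get(hand['handedness'])
--             if lst is not None and (not lst or lst[-1] != i):
--                 lst.append(i)
--     return buckets
-- ===== Notes on version B (the rewrite author's own statement) =====
-- stated objective: alternative
-- what changed: Replaces A's per-side if/elif branches plus collect-then-sorted(set(...)) with a dict-driven single pass: each hand's handedness string directly indexes its bucket in the output dict, and a last-element check keeps every bucket sorted and duplicate-free as it grows, so no sort and no set are ever built.
import Mathlib
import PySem

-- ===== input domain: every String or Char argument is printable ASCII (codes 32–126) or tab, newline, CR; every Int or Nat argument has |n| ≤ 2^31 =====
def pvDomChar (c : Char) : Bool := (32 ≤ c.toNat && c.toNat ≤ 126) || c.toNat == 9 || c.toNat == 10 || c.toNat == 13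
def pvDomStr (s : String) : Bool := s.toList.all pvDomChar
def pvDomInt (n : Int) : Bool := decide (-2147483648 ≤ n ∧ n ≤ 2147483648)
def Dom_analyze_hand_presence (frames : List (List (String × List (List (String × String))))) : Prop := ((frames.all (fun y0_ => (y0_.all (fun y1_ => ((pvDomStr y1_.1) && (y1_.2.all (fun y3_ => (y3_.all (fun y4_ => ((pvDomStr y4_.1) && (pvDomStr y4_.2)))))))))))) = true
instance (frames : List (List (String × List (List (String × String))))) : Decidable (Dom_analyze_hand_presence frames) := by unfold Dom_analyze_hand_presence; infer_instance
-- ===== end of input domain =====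

-- B replaces A's branch-per-side collect-then-sorted(set(...)) with dict-driven dispatch: the
-- handedness string itself indexes the bucket, and a last-element check keeps each bucket
-- sorted and duplicate-free as it grows (alternative decomposition; no sort, no set, no if/elif).

-- ===== PORT A =====
-- A-side helpers: the body of A's inner 'for hand in frame["hands"]' loop and of the outer loop.
def aHand (i : Int) (acc : List Int × List Int) (hand : List (String × String)) : List Int × List Int :=
  if PySem.Dict.getD ⟨hand⟩ "handedness" "" = "Left" then (acc.1 ++ [i], acc.2)
  else if PySem.Dict.getD ⟨hand⟩ "handedness" "" = "Right" then (acc.1, acc.2 ++ [i])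
  else acc

def aFrame (acc : List Int × List Int) (p : Int × List (String × List (List (String × String)))) :
    List Int × List Int :=
  match PySem.Dict.get? ⟨p.2⟩ "hands" with
  | some hands => if hands ≠ [] then hands.foldl (aHand p.1) acc else acc
  | none => acc

def analyze_hand_presence (frames : List (List (String × List (List (String × String))))) :
    List (String × List Int) :=
  let st := (PySem.List.enumerate frames 0).foldl aFrame ([], [])
  [("Left", PySem.List.sorted (PySem.Set.ofList st.1) (fun x => x)),
   ("Right", PySem.List.sorted (PySem.Set.ofList st.2) (fun x => x))]

-- ===== PORT B =====
-- B-side helpers: one hand = one dict lookup by its handedness string plus the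
-- empty-or-last-differs check; one frame folds its hands ('or []' = getD []) into the buckets.
def bHand (i : Int) (d : PySem.Dict String (List Int)) (hand : List (String × String)) :
    PySem.Dict String (List Int) :=
  match PySem.Dict.get? d (PySem.Dict.getD ⟨hand⟩ "handedness" "") with
  | some lst =>
      if lst = [] ∨ PySem.List.pyGet? lst (-1) ≠ some i then
        PySem.Dict.insert d (PySem.Dict.getD ⟨hand⟩ "handedness" "") (lst ++ [i])
      else d
  | none => d

def bFrame (d : PySem.Dict String (List Int))
    (p : Int × List (String × List (List (String × String)))) : PySem.Dict String (List Int) :=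
  ((PySem.Dict.get? ⟨p.2⟩ "hands").getD []).foldl (bHand p.1) d

def analyze_hand_presence_alt (frames : List (List (String × List (List (String × String))))) :
    List (String × List Int) :=
  ((PySem.List.enumerate frames 0).foldl bFrame
    (PySem.Dict.ofList [("Left", []), ("Right", [])])).items

-- ===== PRECONDITION & SPEC =====
-- Pre_ excludes exactly the inputs where Python A raises KeyError: some hand inside a present
-- 'hands' list lacks the 'handedness' key (B raises the same KeyError there).
def Pre_analyze_hand_presence (frames : List (List (String × List (List (String × String))))) : Prop :=
  (frames.all (fun frame =>
    ((PySem.Dict.get? ⟨frame⟩ "hands").getD []).all (fun hand =>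
      (PySem.Dict.get? ⟨hand⟩ "handedness").isSome))) = true
instance (frames : List (List (String × List (List (String × String))))) : Decidable (Pre_analyze_hand_presence frames) := by unfold Pre_analyze_hand_presence; infer_instance

def pvWitness_analyze_hand_presence : (List (List (String × List (List (String × String))))) :=
  [[("hands", [[("handedness", "Left")], [("handedness", "Right")]])], [("other", [])]]

def Spec_analyze_hand_presence (frames : List (List (String × List (List (String × String))))) (out : List (String × List Int)) : Prop := out = analyze_hand_presence_alt frames
instance (frames : List (List (String × List (List (String × String))))) (out : List (String × List Int)) : Decidable (Spec_analyze_hand_presence frames out) := by unfold Spec_analyze_hand_presence; infer_instance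

-- ===== CLAIM (what is proved, stated in full; the proofs are below) =====
def Claim_equal_analyze_hand_presence : Prop := ∀ (frames : List (List (String × List (List (String × String))))), Dom_analyze_hand_presence frames → Pre_analyze_hand_presence frames → Spec_analyze_hand_presence frames (analyze_hand_presence frames)

-- ===== LEMMAS AND PROOFS =====

-- Hand predicates: does this hand read 'Left' / 'Right'?
def hL (hand : List (String × String)) : Bool := PySem.Dict.getD ⟨hand⟩ "handedness" "" == "Left"
def hR (hand : List (String × String)) : Bool := PySem.Dict.getD ⟨hand⟩ "handedness" "" == "Right"

-- The hands list of a frame ([] when the key is absent).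
def handsOf (f : List (String × List (List (String × String)))) : List (List (String × String)) :=
  (PySem.Dict.get? ⟨f⟩ "hands").getD []

-- What A's loop collects for predicate q: one copy of the index per matching hand.
def colA (q : List (String × String) → Bool) :
    List (List (String × List (List (String × String)))) → Int → List Int
  | [], _ => []
  | f :: fs, s => ((handsOf f).filter q).map (fun _ => s) ++ colA q fs (s + 1)

-- What B's loop collects: the index once per frame with a matching hand.
def colB (q : List (String × String) → Bool) :
    List (List (String × List (List (String × String)))) → Int → List Int
  | [], _ => []
  | f :: fs, s => (if ((handsOf f).filter q).isEmpty then [] else [s]) ++ colB q fs (s + 1)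

-- B's conditional append of i to a bucket, applied when b (a matching hand was seen).
def app (i : Int) (b : Bool) (L : List Int) : List Int :=
  if b then (if L = [] ∨ PySem.List.pyGet? L (-1) ≠ some i then L ++ [i] else L) else L

theorem app_idem (i : Int) (b : Bool) (L : List Int) : app i b (app i b L) = app i b L := by
  cases b with
  | false => simp [app]
  | true =>
    by_cases h : L = [] ∨ PySem.List.pyGet? L (-1) ≠ some i
    · simp [app, h, PySem.List.pyGet?_neg_one_append_singleton]
    · simp [app, h]

theorem innerA (hands : List (List (String × String))) (i : Int) :
    ∀ l r : List Int, hands.foldl (aHand i) (l, r) =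
      (l ++ (hands.filter hL).map (fun _ => i), r ++ (hands.filter hR).map (fun _ => i)) := by
  induction hands with
  | nil => simp
  | cons h t ih =>
    intro l r
    simp only [List.foldl_cons, aHand, List.filter_cons]
    by_cases h1 : PySem.Dict.getD ⟨h⟩ "handedness" "" = "Left"
    · simp [h1, hL, hR, ih]
    · by_cases h2 : PySem.Dict.getD ⟨h⟩ "handedness" "" = "Right"
      · simp [h2, hL, hR, ih]
      · simp [h1, h2, hL, hR, ih]

theorem app_absorb (i : Int) (b : Bool) (L : List Int) : app i b (app i true L) = app i true L := by
  cases b with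
  | false => simp [app]
  | true => exact app_idem i true L

theorem innerB (hands : List (List (String × String))) (i : Int) :
    ∀ L R : List Int, hands.foldl (bHand i) ⟨[("Left", L), ("Right", R)]⟩ =
      ⟨[("Left", app i (hands.any hL) L), ("Right", app i (hands.any hR) R)]⟩ := by
  induction hands with
  | nil => intro L R; simp [app]
  | cons h t ih =>
    intro L R
    simp only [List.foldl_cons, List.any_cons]
    by_cases h1 : PySem.Dict.getD ⟨h⟩ "handedness" "" = "Left"
    · have step : bHand i ⟨[("Left", L), ("Right", R)]⟩ h =
          ⟨[("Left", app i true L), ("Right", R)]⟩ := by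
        simp only [bHand, h1, app]
        by_cases hc : L = [] ∨ PySem.List.pyGet? L (-1) ≠ some i
        · simp [PySem.Dict.get?, PySem.Dict.insert, hc]
        · simp [PySem.Dict.get?, hc]
      have hb : hL h = true := by simp [hL, h1]
      have hb2 : hR h = false := by
        unfold hR; rw [beq_eq_false_iff_ne]; rw [h1]; decide
      rw [step, ih]
      simp [hb, hb2, app_absorb]
    · by_cases h2 : PySem.Dict.getD ⟨h⟩ "handedness" "" = "Right"
      · have step : bHand i ⟨[("Left", L), ("Right", R)]⟩ h =
            ⟨[("Left", L), ("Right", app i true R)]⟩ := by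
          simp only [bHand, h2, app]
          by_cases hc : R = [] ∨ PySem.List.pyGet? R (-1) ≠ some i
          · simp [PySem.Dict.get?, PySem.Dict.insert, hc]
          · simp [PySem.Dict.get?, hc]
        have hb : hR h = true := by simp [hR, h2]
        have hb' : hL h = false := by unfold hL; rwa [beq_eq_false_iff_ne]
        rw [step, ih]
        simp [hb, hb', app_absorb]
      · have e1 : (("Left" : String) == PySem.Dict.getD ⟨h⟩ "handedness" "") = false := by
          rw [beq_eq_false_iff_ne]; exact fun hh => h1 hh.symm
        have e2 : (("Right" : String) == PySem.Dict.getD ⟨h⟩ "handedness" "") = false := by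
          rw [beq_eq_false_iff_ne]; exact fun hh => h2 hh.symm
        have step : bHand i ⟨[("Left", L), ("Right", R)]⟩ h =
            ⟨[("Left", L), ("Right", R)]⟩ := by
          simp [bHand, PySem.Dict.get?, List.find?, e1, e2]
        have hb1 : hL h = false := by unfold hL; rwa [beq_eq_false_iff_ne]
        have hb2 : hR h = false := by unfold hR; rwa [beq_eq_false_iff_ne]
        rw [step, ih]; simp [hb1, hb2]

theorem app_fresh (i : Int) (b : Bool) (L : List Int) (hlt : ∀ x ∈ L, x < i) :
    app i b L = L ++ (if b then [i] else []) := by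
  cases b with
  | false => simp [app]
  | true =>
    rcases L.eq_nil_or_concat with h | ⟨ys, y, rfl⟩
    · simp [app, h]
    · have hy : y < i := hlt y (by simp)
      have hne : ¬ y = i := by omega
      simp [app, PySem.List.pyGet?_neg_one_append_singleton, hne]

theorem outerB (frames : List (List (String × List (List (String × String))))) :
    ∀ (s : Int) (L R : List Int), (∀ x ∈ L, x < s) → (∀ x ∈ R, x < s) →
      (PySem.List.enumerate frames s).foldl bFrame ⟨[("Left", L), ("Right", R)]⟩ =
      ⟨[("Left", L ++ colB hL frames s), ("Right", R ++ colB hR frames s)]⟩ := by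
  induction frames with
  | nil => intro s L R _ _; simp [PySem.List.enumerate_nil, colB]
  | cons f fs ih =>
    intro s L R hLlt hRlt
    rw [PySem.List.enumerate_cons]
    simp only [List.foldl_cons]
    have hbf : bFrame (⟨[("Left", L), ("Right", R)]⟩ : PySem.Dict String (List Int)) (s, f) =
        ⟨[("Left", app s ((handsOf f).any hL) L), ("Right", app s ((handsOf f).any hR) R)]⟩ := by
      simp only [bFrame]
      exact innerB (handsOf f) s L R
    rw [hbf, app_fresh s _ L hLlt, app_fresh s _ R hRlt]
    have hAny : ∀ q : List (String × String) → Bool,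
        ((handsOf f).any q) = !((handsOf f).filter q).isEmpty := by
      intro q; rw [Bool.eq_iff_iff]; simp [List.filter_eq_nil_iff, List.any_eq_true]
    rw [ih (s + 1) _ _ ?_ ?_]
    · simp only [colB, hAny]
      by_cases e1 : ((handsOf f).filter hL).isEmpty <;>
        by_cases e2 : ((handsOf f).filter hR).isEmpty <;>
        simp [e1, e2, List.append_assoc]
    · intro x hx; rcases List.mem_append.mp hx with hx | hx
      · have := hLlt x hx; omega
      · split at hx <;> simp at hx; omega
    · intro x hx; rcases List.mem_append.mp hx with hx | hx
      · have := hRlt x hx; omega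
      · split at hx <;> simp at hx; omega

theorem outerA (frames : List (List (String × List (List (String × String))))) :
    ∀ (s : Int) (l r : List Int), (PySem.List.enumerate frames s).foldl aFrame (l, r) =
      (l ++ colA hL frames s, r ++ colA hR frames s) := by
  induction frames with
  | nil => intro s l r; simp [PySem.List.enumerate_nil, colA]
  | cons f fs ih =>
    intro s l r
    rw [PySem.List.enumerate_cons]
    simp only [List.foldl_cons]
    cases hg : PySem.Dict.get? (⟨f⟩ : PySem.Dict String (List (List (String × String)))) "hands" with
    | none => simp [aFrame, hg, ih, colA, handsOf]
    | some hs =>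
      by_cases hne : hs = []
      · subst hne; simp [aFrame, hg, ih, colA, handsOf]
      · simp only [aFrame, hg, if_pos hne]
        rw [innerA, ih]
        simp [colA, handsOf, hg, List.append_assoc]

theorem mem_colB (q : List (String × String) → Bool)
    (frames : List (List (String × List (List (String × String))))) :
    ∀ (s : Int) (x : Int), x ∈ colB q frames s → s ≤ x := by
  induction frames with
  | nil => intro s x hx; simp [colB] at hx
  | cons f fs ih =>
    intro s x hx
    simp only [colB, List.mem_append] at hx
    rcases hx with hx | hx
    · by_cases hc : ((handsOf f).filter q).isEmpty
      · simp [hc] at hx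
      · simp [hc] at hx; omega
    · have := ih (s + 1) x hx; omega

theorem pairwise_colB (q : List (String × String) → Bool)
    (frames : List (List (String × List (List (String × String))))) :
    ∀ s : Int, (colB q frames s).Pairwise (· < ·) := by
  induction frames with
  | nil => intro s; simp [colB]
  | cons f fs ih =>
    intro s
    simp only [colB]
    apply List.pairwise_append.mpr
    refine ⟨?_, ih (s + 1), ?_⟩
    · split <;> simp
    · intro x hx y hy
      have hy' := mem_colB q fs (s + 1) y hy
      by_cases hc : ((handsOf f).filter q).isEmpty
      · simp [hc] at hx
      · simp [hc] at hx; omega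

theorem replicate_add (k : Nat) (s : Int) :
    ∀ acc : List Int, s ∈ acc → (List.replicate k s).foldl PySem.Set.add acc = acc := by
  induction k with
  | zero => intro acc _; simp
  | succ n ih =>
    intro acc hmem
    simp only [List.replicate_succ, List.foldl_cons]
    have : PySem.Set.add acc s = acc := by
      simp [PySem.Set.add, PySem.Set.contains, hmem]
    rw [this, ih acc hmem]

theorem dedup_colA (q : List (String × String) → Bool)
    (frames : List (List (String × List (List (String × String))))) :
    ∀ (s : Int) (l : List Int), (∀ x ∈ l, x < s) →
      (colA q frames s).foldl PySem.Set.add l = l ++ colB q frames s := by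
  induction frames with
  | nil => intro s l _; simp [colA, colB]
  | cons f fs ih =>
    intro s l hl
    simp only [colA, colB, List.foldl_append]
    rw [List.map_const']
    cases hk : ((handsOf f).filter q).length with
    | zero =>
      have he : ((handsOf f).filter q).isEmpty = true := by
        simp [← List.length_eq_zero_iff, hk]
      simp only [List.replicate_zero, List.foldl_nil, he, if_pos, List.nil_append]
      rw [ih (s + 1) l (fun x hx => by have := hl x hx; omega)]
    | succ n =>
      have he : ((handsOf f).filter q).isEmpty = false := by
        simp [← List.length_eq_zero_iff, hk]
      have hnot : s ∉ l := fun h => by have := hl s h; omega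
      simp only [List.replicate_succ, List.foldl_cons]
      have hadd : PySem.Set.add l s = l ++ [s] := by
        simp [PySem.Set.add, PySem.Set.contains, hnot]
      rw [hadd, replicate_add n s (l ++ [s]) (by simp),
        ih (s + 1) (l ++ [s]) (by intro x hx; simp at hx; rcases hx with hx | hx
                                  · have := hl x hx; omega
                                  · omega)]
      simp [he]

theorem set_sorted_colA (q : List (String × String) → Bool)
    (frames : List (List (String × List (List (String × String))))) :
    PySem.List.sorted (PySem.Set.ofList (colA q frames 0)) (fun x => x) = colB q frames 0 := by
  have h1 : PySem.Set.ofList (colA q frames 0) = colB q frames 0 := by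
    rw [PySem.Set.ofList_eq_foldl]
    simpa using dedup_colA q frames 0 [] (by simp)
  rw [h1]
  exact PySem.List.sorted_eq_of_perm_of_pairwise_lt _ _ _ (List.Perm.refl _)
    (pairwise_colB q frames 0)

-- ===== VERDICT (by name: the statement is the Claim_ definition above) =====
theorem analyze_hand_presence_spec : Claim_equal_analyze_hand_presence := by
  intro frames _ _
  unfold Spec_analyze_hand_presence analyze_hand_presence analyze_hand_presence_alt
  rw [outerA frames 0 [] []]
  have hof : PySem.Dict.ofList ([("Left", []), ("Right", [])] : List (String × List Int)) =
      ⟨[("Left", []), ("Right", [])]⟩ := by decide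
  rw [hof, outerB frames 0 [] [] (by simp) (by simp)]
  simp [set_sorted_colA]
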